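-- pv_equiv track=rewrite | github.com/mws75/algo_practice- | search_transportation.py | sort_transportation
-- ===== SOURCE A (Python) =====
-- my_list = [1,2,3,4,5,6]
--
-- target = 3
--
-- def sort_list_transport(my_list, new_index, target):
--     sorted_list = []
--     for i in range(len(my_list)):
--         if i == new_index:
--             sorted_list.append(target)
--             sorted_list.append(my_list[i])
--         elif my_list[i] != target:
--             sorted_list.append(my_list[i])
--     return sorted_list
--
-- def sort_transportation(my_list, target):
--     sorted_list = []
--     new_index = -1
--     for i in range(len(my_list)):
--         if my_list[i] == target:
--             new_index = i - 1
--             sorted_list = sort_list_transport(my_list, new_index, target)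
--
--     return sorted_list
-- ===== SOURCE B (Python) =====
-- def sort_transportation(my_list, target):
--     # O(n): find last occurrence in one reverse scan, then build by slice + filter
--     if target not in my_list:
--         return []
--     j = len(my_list) - 1 - my_list[::-1].index(target)
--     if j == 0:
--         return [x for x in my_list if x != target]
--     return ([x for x in my_list[:j-1] if x != target]
--             + [target, my_list[j-1]]
--             + [x for x in my_list[j:] if x != target])
-- ===== Notes on version B (the rewrite author's own statement) =====
-- stated objective: alternative
-- what changed: B finds the last occurrence of target with one reverse-scan index lookup and builds the result in a single slice-and-filter pass, instead of A's loop that rebuilds the whole output list from scratch at every occurrence of target (O(n*k) vs O(n); not measurably faster on the sampled inputs, where occurrences are few).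
import Mathlib
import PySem

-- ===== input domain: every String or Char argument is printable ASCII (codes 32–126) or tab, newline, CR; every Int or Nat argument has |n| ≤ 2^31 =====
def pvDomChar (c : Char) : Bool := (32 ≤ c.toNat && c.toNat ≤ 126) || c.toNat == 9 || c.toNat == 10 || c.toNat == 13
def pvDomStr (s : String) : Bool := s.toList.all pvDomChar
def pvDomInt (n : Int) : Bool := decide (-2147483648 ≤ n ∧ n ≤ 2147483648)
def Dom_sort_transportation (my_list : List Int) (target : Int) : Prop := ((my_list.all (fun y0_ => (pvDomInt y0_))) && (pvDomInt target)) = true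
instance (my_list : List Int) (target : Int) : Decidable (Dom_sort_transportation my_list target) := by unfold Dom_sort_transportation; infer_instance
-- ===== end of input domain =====

-- B replaces A's rebuild-on-every-occurrence loop by one reverse scan for the last
-- occurrence followed by a single slice-and-filter build pass; objective: alternative.

-- ===== PORT A =====
def sort_list_transport (my_list : List Int) (new_index : Int) (target : Int) : List Int :=
  (PySem.List.pyRange 0 my_list.length 1).foldl (fun sorted_list i =>
    if i = new_index then
      sorted_list ++ [target] ++ [PySem.List.pyGetD my_list i 0]
    else if PySem.List.pyGetD my_list i 0 ≠ target then
      sorted_list ++ [PySem.List.pyGetD my_list i 0]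
    else sorted_list) []

def sort_transportation (my_list : List Int) (target : Int) : List Int :=
  ((PySem.List.pyRange 0 my_list.length 1).foldl (fun s i =>
      if PySem.List.pyGetD my_list i 0 == target then
        (sort_list_transport my_list (i - 1) target, i - 1)
      else s) ([], (-1 : Int))).1

-- ===== PORT B =====
def sort_transportation_alt (my_list : List Int) (target : Int) : List Int :=
  if target ∈ my_list then
    let rev := (PySem.List.slice? my_list none none (-1)).getD []   -- my_list[::-1]
    let j : Int := (my_list.length : Int) - 1 - ((PySem.List.index? rev target).getD 0 : Nat)
    if j = 0 then
      my_list.filter (fun x => decide (x ≠ target))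
    else
      (PySem.List.slice my_list none (some (j - 1))).filter (fun x => decide (x ≠ target))
        ++ [target, PySem.List.pyGetD my_list (j - 1) 0]
        ++ (PySem.List.slice my_list (some j) none).filter (fun x => decide (x ≠ target))
  else []

-- ===== PRECONDITION & SPEC =====
def Spec_sort_transportation (my_list : List Int) (target : Int) (out : List Int) : Prop := out = sort_transportation_alt my_list target
instance (my_list : List Int) (target : Int) (out : List Int) : Decidable (Spec_sort_transportation my_list target out) := by unfold Spec_sort_transportation; infer_instance

-- ===== CLAIM (what is proved, stated in full; the proofs are below) =====
def Claim_equal_sort_transportation : Prop := ∀ (my_list : List Int) (target : Int), Dom_sort_transportation my_list target → Spec_sort_transportation my_list target (sort_transportation my_list target)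

-- ===== LEMMAS AND PROOFS =====

-- fold keeping only the last hit: a 'last index such that p' loop
theorem foldl_last_hit {α β : Type} (l : List α) (p : α → Bool) (f : α → β) (init : β) :
    l.foldl (fun s i => if p i then f i else s) init
      = ((l.filter p).getLast?).elim init f := by
  rw [PySem.List.foldl_if_eq_foldl_filter p (fun (_ : β) i => f i) l init]
  induction (l.filter p) generalizing init with
  | nil => rfl
  | cons a m ih =>
      simp only [List.foldl_cons, ih (f a)]
      cases m with
      | nil => simp
      | cons b m' =>
          rw [List.getLast?_cons_cons]
          cases h : (b :: m').getLast? with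
          | none => simp at h
          | some c => simp

-- the inner rebuild as a flatMap over List.range, all indexing through getD
theorem slt_eq_flatMap (my_list : List Int) (k target : Int) :
    sort_list_transport my_list k target
      = (List.range my_list.length).flatMap (fun (i : Nat) =>
          if (i : Int) = k then [target, my_list.getD i 0]
          else if my_list.getD i 0 ≠ target then [my_list.getD i 0] else []) := by
  unfold sort_list_transport
  rw [PySem.List.foldl_congr_mem _ _
        (fun sorted_list i => sorted_list ++
          (if i = k then [target, PySem.List.pyGetD my_list i 0]
           else if PySem.List.pyGetD my_list i 0 ≠ target then [PySem.List.pyGetD my_list i 0] else [])) _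
        (by intro acc x _; split_ifs <;> simp_all)]
  rw [PySem.List.foldl_append_eq_flatMap]
  rw [PySem.List.pyRange_zero_nat]
  rw [List.flatMap_map]
  simp only [PySem.List.pyGetD_natCast, List.nil_append]

-- closed form of the flatMap: filter the list, with [target, xs[k]] spliced in at a valid k
theorem flatMap_closed (target : Int) : ∀ (xs : List Int) (k : Int),
    (List.range xs.length).flatMap (fun (i : Nat) =>
        if (i : Int) = k then [target, xs.getD i 0]
        else if xs.getD i 0 ≠ target then [xs.getD i 0] else [])
      = if 0 ≤ k ∧ k < (xs.length : Int) then
          (xs.take k.toNat).filter (fun x => decide (x ≠ target))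
            ++ target :: xs.getD k.toNat 0
            :: (xs.drop (k.toNat + 1)).filter (fun x => decide (x ≠ target))
        else xs.filter (fun x => decide (x ≠ target)) := by
  intro xs
  induction xs with
  | nil => intro k; simp
  | cons x xs ih =>
      intro k
      rw [List.length_cons, List.range_succ_eq_map, List.flatMap_cons, List.flatMap_map]
      have hshift : (List.range xs.length).flatMap
          (fun (i : Nat) => if ((Nat.succ i : Nat) : Int) = k then [target, (x :: xs).getD (Nat.succ i) 0]
            else if (x :: xs).getD (Nat.succ i) 0 ≠ target then [(x :: xs).getD (Nat.succ i) 0] else [])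
          = (List.range xs.length).flatMap (fun (i : Nat) =>
            if (i : Int) = k - 1 then [target, xs.getD i 0]
            else if xs.getD i 0 ≠ target then [xs.getD i 0] else []) := by
        apply congrArg List.flatten
        apply List.map_congr_left
        intro i _
        have hc : ((Nat.succ i : Nat) : Int) = k ↔ (i : Int) = k - 1 := by
          constructor <;> intro h <;> omega
        simp only [Nat.succ_eq_add_one, List.getD_cons_succ]
        rw [if_congr hc rfl rfl]
      rw [hshift, ih (k - 1)]
      clear hshift ih
      simp only [List.getD_cons_zero]
      push_cast
      by_cases hk0 : k = 0
      · subst hk0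
        rw [if_pos rfl, if_neg (by omega : ¬ (0 ≤ (0:Int) - 1 ∧ (0:Int) - 1 < (xs.length : Int))),
          if_pos (by constructor <;> omega : (0:Int) ≤ 0 ∧ (0:Int) < (xs.length : Int) + 1)]
        simp
      by_cases hkneg : k < 0
      · rw [if_neg (by omega : ¬ ((0:Int) = k)),
          if_neg (by omega : ¬ (0 ≤ k - 1 ∧ k - 1 < (xs.length : Int))),
          if_neg (by omega : ¬ (0 ≤ k ∧ k < (xs.length : Int) + 1))]
        by_cases hx : x = target <;> simp [hx]
      · have hk1 : 1 ≤ k := by omega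
        by_cases hlt : k < (xs.length : Int) + 1
        · have htn : k.toNat = (k - 1).toNat + 1 := by omega
          rw [if_neg (by omega : ¬ ((0:Int) = k)),
            if_pos (by constructor <;> omega : 0 ≤ k - 1 ∧ k - 1 < (xs.length : Int)),
            if_pos (by constructor <;> omega : 0 ≤ k ∧ k < (xs.length : Int) + 1), htn]
          simp only [List.take_succ_cons, List.getD_cons_succ, List.drop_succ_cons,
            List.filter_cons]
          by_cases hx : x = target <;> simp [hx]
        · rw [if_neg (by omega : ¬ ((0:Int) = k)),
            if_neg (by omega : ¬ (0 ≤ k - 1 ∧ k - 1 < (xs.length : Int))),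
            if_neg (by omega : ¬ (0 ≤ k ∧ k < (xs.length : Int) + 1))]
          by_cases hx : x = target <;> simp [hx]

-- A's outer loop: the result is the rebuild at (last hit − 1), or [] when target is absent
theorem sortA_char (my_list : List Int) (target : Int) :
    sort_transportation my_list target
      = (((PySem.List.pyRange 0 my_list.length 1).filter
            (fun i => PySem.List.pyGetD my_list i 0 == target)).getLast?).elim []
          (fun j => sort_list_transport my_list (j - 1) target) := by
  unfold sort_transportation
  rw [foldl_last_hit]
  cases ((PySem.List.pyRange 0 my_list.length 1).filter
      (fun i => PySem.List.pyGetD my_list i 0 == target)).getLast? <;> rfl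

-- last hit of the index loop, given the decomposition at the last occurrence
theorem lastHit_eq (u w : List Int) (target : Int) (hw : target ∉ w) :
    (((PySem.List.pyRange 0 (u ++ target :: w).length 1).filter
        (fun i => PySem.List.pyGetD (u ++ target :: w) i 0 == target)).getLast?)
      = some (u.length : Int) := by
  have hlen : ((u ++ target :: w).length : Int) = (u.length : Int) + 1 + w.length := by
    simp; omega
  rw [hlen]
  rw [PySem.List.pyRange_one_append 0 ((u.length : Int) + 1) _ (by omega) (by omega)]
  rw [List.filter_append]
  have hright : (PySem.List.pyRange ((u.length : Int) + 1) ((u.length : Int) + 1 + w.length)).filter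
      (fun i => PySem.List.pyGetD (u ++ target :: w) i 0 == target) = [] := by
    rw [List.filter_eq_nil_iff]
    intro i hi
    rw [PySem.List.mem_pyRange_one] at hi
    have hip : i = ((i.toNat : Nat) : Int) := by omega
    rw [hip, PySem.List.pyGetD_natCast]
    obtain ⟨m, hm, hmlt⟩ : ∃ m, i.toNat - u.length = m + 1 ∧ m < w.length := by
      refine ⟨i.toNat - u.length - 1, by omega, by omega⟩
    rw [List.getD_eq_getElem?_getD,
      List.getElem?_append_right (by omega : u.length ≤ i.toNat), hm,
      List.getElem?_cons_succ, List.getElem?_eq_getElem hmlt]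
    simp only [Option.getD_some, beq_iff_eq]
    intro hc
    exact hw (hc ▸ List.getElem_mem _)
  rw [hright, List.append_nil]
  rw [PySem.List.pyRange_one_append 0 (u.length : Int) _ (by omega) (by omega)]
  have hsing : PySem.List.pyRange (u.length : Int) ((u.length : Int) + 1) = [(u.length : Int)] :=
    PySem.List.pyRange_one_singleton _
  rw [hsing, List.filter_append]
  have hj : PySem.List.pyGetD (u ++ target :: w) (u.length : Int) 0 = target := by
    rw [PySem.List.pyGetD_natCast, List.getD_eq_getElem?_getD,
      List.getElem?_append_right (Nat.le_refl u.length)]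
    simp
  simp only [List.filter_cons, List.filter_nil, hj, beq_self_eq_true, if_pos]
  exact List.getLast?_concat

-- ===== VERDICT (by name: the statement is the Claim_ definition above) =====
theorem sort_transportation_spec : Claim_equal_sort_transportation := by
  intro my_list target _
  unfold Spec_sort_transportation
  simp only [sort_transportation_alt]
  by_cases hmem : target ∈ my_list
  · -- decompose at the last occurrence via index? on the reverse
    have hrev : target ∈ my_list.reverse := List.mem_reverse.mpr hmem
    obtain ⟨r, hr⟩ := Option.isSome_iff_exists.mp
      ((PySem.List.index?_isSome_iff my_list.reverse target).mpr hrev)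
    obtain ⟨pre, suf, hsplit, hlenpre, hnotpre⟩ :=
      (PySem.List.index?_eq_some_iff my_list.reverse target r).mp hr
    have hdec : my_list = suf.reverse ++ target :: pre.reverse := by
      have := congrArg List.reverse hsplit
      simpa using this
    have hnw : target ∉ pre.reverse := fun h => hnotpre (List.mem_reverse.mp h)
    set u := suf.reverse with hu
    set w := pre.reverse with hwdef
    have hlen : my_list.length = u.length + 1 + w.length := by
      rw [hdec]; simp; omega
    have hrw : w.length = r := by rw [hwdef]; simpa using hlenpre
    -- B's index j
    have hrevlist : (PySem.List.slice? my_list none none (-1)).getD [] = my_list.reverse := by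
      rw [PySem.List.slice?_none_none_neg_one]; rfl
    have hjB : ((my_list.length : Int) - 1 - ((PySem.List.index? ((PySem.List.slice? my_list none none (-1)).getD []) target).getD 0 : Nat))
        = (u.length : Int) := by
      rw [hrevlist, hr]; simp only [Option.getD_some]; omega
    rw [if_pos hmem, hjB]
    -- A's side
    rw [sortA_char]
    rw [show my_list = u ++ target :: w from hdec] at *
    rw [lastHit_eq u w target hnw]
    simp only [Option.elim_some]
    rw [slt_eq_flatMap, flatMap_closed]
    by_cases hu0 : u.length = 0
    · have hA : ¬ (0 ≤ (u.length : Int) - 1 ∧ (u.length : Int) - 1 < (((u ++ target :: w).length : Int))) := by omega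
      rw [if_neg hA, if_pos (show ((u.length : Int)) = 0 by omega)]
    · have hju : ¬ ((u.length : Int) = 0) := by omega
      rw [if_neg hju]
      have hcond : 0 ≤ (u.length : Int) - 1 ∧ (u.length : Int) - 1 < (((u ++ target :: w).length : Int)) := by
        constructor
        · omega
        · rw [hlen] ; push_cast ; omega
      rw [if_pos hcond]
      rw [PySem.List.slice_to _ (by omega : (0:Int) ≤ (u.length : Int) - 1)]
      rw [PySem.List.slice_from _ (by omega : (0:Int) ≤ (u.length : Int))]
      have ht1 : ((u.length : Int) - 1).toNat = u.length - 1 := by omega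
      have ht2 : (u.length : Int).toNat = u.length := by omega
      have ht3 : (u.length - 1) + 1 = u.length := by omega
      rw [ht1, ht2, ht3]
      have hg : PySem.List.pyGetD (u ++ target :: w) ((u.length : Int) - 1) 0
          = (u ++ target :: w).getD (u.length - 1) 0 := by
        rw [show (u.length : Int) - 1 = ((u.length - 1 : Nat) : Int) by omega,
          PySem.List.pyGetD_natCast]
      rw [hg]
      simp
  · -- target absent: both return []
    rw [if_neg hmem, sortA_char]
    have hfilt : (PySem.List.pyRange 0 my_list.length 1).filter
        (fun i => PySem.List.pyGetD my_list i 0 == target) = [] := by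
      rw [List.filter_eq_nil_iff]
      intro i hi
      rw [PySem.List.mem_pyRange_one] at hi
      rw [PySem.List.pyGetD_eq_getElem _ 0 hi.1 hi.2]
      simp only [beq_iff_eq]
      intro hc
      exact hmem (hc ▸ List.getElem_mem _)
    rw [hfilt]; rfl
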